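-- pv_equiv track=rewrite | github.com/VarvaraSoundeon/top-notch-hat | hat.py | matchMaking
-- ===== SOURCE A (Python) =====
-- import itertools as iterator
--
-- def matchMaking(ids):
--     permutations = list(iterator.permutations(ids,2))
--     matches, j = [], 0
--     maxPairs, step = len(permutations), len(ids)
--     for i in range(maxPairs):
--         if i !=0 and i%(step-1) == 0:
--             j = j + 1
--         matches.append(permutations[j + (i%(step-1))*step])
--     return matches
-- ===== SOURCE B (Python) =====
-- import itertools as iterator
--
-- def matchMaking(ids):
--     perms = list(iterator.permutations(ids, 2))
--     n = len(ids)
--     rows = [perms[r * n:(r + 1) * n] for r in range(n - 1)]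
--     return [rows[r][q] for q in range(n) for r in range(n - 1)]
-- ===== Notes on version B (the rewrite author's own statement) =====
-- stated objective: simpler
-- what changed: Replaces A's flat loop with its running modular j-counter by an explicit 2D reshape of the permutation list into n-1 rows of length n read off column-major.
import Mathlib
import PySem

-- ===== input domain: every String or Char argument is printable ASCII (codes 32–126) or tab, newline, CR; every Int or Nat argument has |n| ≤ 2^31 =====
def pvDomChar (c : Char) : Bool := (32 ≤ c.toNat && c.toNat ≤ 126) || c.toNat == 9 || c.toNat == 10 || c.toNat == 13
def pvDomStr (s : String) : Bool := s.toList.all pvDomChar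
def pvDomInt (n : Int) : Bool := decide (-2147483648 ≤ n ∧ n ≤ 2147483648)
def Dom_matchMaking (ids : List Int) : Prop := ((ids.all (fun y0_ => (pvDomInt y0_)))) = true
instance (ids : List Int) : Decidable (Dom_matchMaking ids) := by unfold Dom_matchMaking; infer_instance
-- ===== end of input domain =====

-- B reshapes the permutation list into n-1 rows of length n and reads it column-major,
-- replacing A's running modular j-counter; objective: simpler.

-- ===== PORT A =====
-- itertools.permutations(ids, 2): for each position p, pair ids[p] with every other position in order
def pvPerms2 (xs : List Int) : List (Int × Int) :=
  (List.range xs.length).flatMap (fun p =>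
    (List.range (xs.length - 1)).map (fun t =>
      (xs.getD p 0, xs.getD (if t < p then t else t + 1) 0)))

def matchMaking (ids : List Int) : List (Int × Int) :=
  let permutations := pvPerms2 ids
  let maxPairs : Int := permutations.length
  let step : Int := ids.length
  ((PySem.List.pyRange 0 maxPairs 1).foldl
    (fun (st : List (Int × Int) × Int) (i : Int) =>
      let j : Int := if i ≠ 0 ∧ PySem.Int.mod i (step - 1) = 0 then st.2 + 1 else st.2
      (st.1 ++ [PySem.List.pyGetD permutations (j + PySem.Int.mod i (step - 1) * step) (0, 0)], j))
    ([], 0)).1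

-- ===== PORT B =====
def matchMaking_alt (ids : List Int) : List (Int × Int) :=
  let perms := pvPerms2 ids
  let n := ids.length
  let rows := (List.range (n - 1)).map (fun r =>
    PySem.List.slice perms (some ((r * n : Nat) : Int)) (some ((((r + 1) * n : Nat)) : Int)))
  (List.range n).flatMap (fun q =>
    (List.range (n - 1)).map (fun r => ((rows.getD r []).getD q (0, 0))))

-- ===== PRECONDITION & SPEC =====
def Spec_matchMaking (ids : List Int) (out : List (Int × Int)) : Prop := out = matchMaking_alt ids
instance (ids : List Int) (out : List (Int × Int)) : Decidable (Spec_matchMaking ids out) := by unfold Spec_matchMaking; infer_instance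

-- ===== CLAIM (what is proved, stated in full; the proofs are below) =====
def Claim_equal_matchMaking : Prop := ∀ (ids : List Int), Dom_matchMaking ids → Spec_matchMaking ids (matchMaking ids)

-- ===== LEMMAS AND PROOFS =====

theorem pvPerms2_length (xs : List Int) :
    (pvPerms2 xs).length = xs.length * (xs.length - 1) := by
  simp [pvPerms2, List.length_flatMap, List.map_const', List.sum_replicate, smul_eq_mul]

-- the state of A's loop after the first m iterations
theorem loopA_inv (L : List (Int × Int)) (n : Nat) (hn : 2 ≤ n) (m : Nat) :
    (List.range m).foldl
      (fun (st : List (Int × Int) × Int) (k : Nat) =>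
        let i : Int := 0 + (k : Int)
        let j : Int := if i ≠ 0 ∧ PySem.Int.mod i ((n : Int) - 1) = 0 then st.2 + 1 else st.2
        (st.1 ++ [PySem.List.pyGetD L (j + PySem.Int.mod i ((n : Int) - 1) * (n : Int)) (0, 0)], j))
      ([], 0)
    = ((List.range m).map (fun i => L.getD (i / (n - 1) + (i % (n - 1)) * n) (0, 0)),
       (((m - 1) / (n - 1) : Nat) : Int)) := by
  have hcast : ((n : Int) - 1) = ((n - 1 : Nat) : Int) := by omega
  induction m with
  | zero => simp
  | succ m ih =>
    rw [List.range_succ, List.foldl_append, ih, List.map_append]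
    simp only [List.foldl_cons, List.foldl_nil, zero_add, hcast, PySem.Int.mod_natCast]
    have hcond : ((m : Int) ≠ 0 ∧ ((m % (n - 1) : Nat) : Int) = 0) ↔ (m ≠ 0 ∧ m % (n - 1) = 0) := by
      constructor <;> intro h <;> exact ⟨by omega, by omega⟩
    have hnat : (if m ≠ 0 ∧ m % (n - 1) = 0 then (m - 1) / (n - 1) + 1 else (m - 1) / (n - 1))
        = m / (n - 1) := by
      by_cases h0 : m = 0
      · simp [h0]
      · obtain ⟨m', rfl⟩ : ∃ m', m = m' + 1 := ⟨m - 1, by omega⟩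
        have hne : m' + 1 ≠ 0 := by omega
        rw [Nat.succ_div, if_congr (and_iff_right hne) rfl rfl]
        simp only [Nat.add_sub_cancel]
        by_cases hd : (n - 1) ∣ (m' + 1)
        · rw [if_pos (Nat.dvd_iff_mod_eq_zero.1 hd), if_pos hd]
        · rw [if_neg (fun hc => hd (Nat.dvd_iff_mod_eq_zero.2 hc)), if_neg hd, Nat.add_zero]
    have hj : (if (m : Int) ≠ 0 ∧ ((m % (n - 1) : Nat) : Int) = 0
          then (((m - 1) / (n - 1) : Nat) : Int) + 1 else (((m - 1) / (n - 1) : Nat) : Int))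
        = ((m / (n - 1) : Nat) : Int) := by
      rw [if_congr hcond rfl rfl, ← hnat]
      split_ifs <;> push_cast <;> ring
    have hidx : ((m / (n - 1) : Nat) : Int) + ((m % (n - 1) : Nat) : Int) * (n : Int)
        = (((m / (n - 1) + (m % (n - 1)) * n : Nat)) : Int) := by push_cast; ring
    rw [hj, hidx, PySem.List.pyGetD_natCast]
    simp

-- A's loop in closed form
theorem matchMaking_eq_map (ids : List Int) (hn2 : 2 ≤ ids.length) :
    matchMaking ids =
      (List.range (ids.length * (ids.length - 1))).map
        (fun i => (pvPerms2 ids).getD (i / (ids.length - 1) + (i % (ids.length - 1)) * ids.length) (0, 0)) := by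
  simp only [matchMaking]
  rw [PySem.List.pyRange_one, List.foldl_map]
  have hN : ((((pvPerms2 ids).length : Int)) - 0).toNat = (pvPerms2 ids).length := by omega
  rw [hN, loopA_inv (pvPerms2 ids) ids.length hn2, pvPerms2_length]

-- B in closed form
theorem matchMaking_alt_eq (ids : List Int) (_hn : 2 ≤ ids.length) :
    matchMaking_alt ids =
      (List.range ids.length).flatMap (fun q =>
        (List.range (ids.length - 1)).map (fun r => (pvPerms2 ids).getD (r * ids.length + q) (0, 0))) := by
  unfold matchMaking_alt
  apply List.flatMap_congr
  intro q hq
  rw [List.mem_range] at hq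
  apply List.map_congr_left
  intro r hr
  rw [List.mem_range] at hr
  have hrow : ((List.range (ids.length - 1)).map (fun r =>
      PySem.List.slice (pvPerms2 ids) (some ((r * ids.length : Nat) : Int))
        (some (((r + 1) * ids.length : Nat) : Int)))).getD r []
      = ((pvPerms2 ids).drop (r * ids.length)).take ids.length := by
    rw [List.getD_eq_getElem?_getD, List.getElem?_map, List.getElem?_range hr]
    simp only [Option.map_some, Option.getD_some, PySem.List.slice_natCast]
    congr 1
    rw [Nat.succ_mul]
    omega
  rw [hrow]
  have hlen : r * ids.length + q < (pvPerms2 ids).length := by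
    rw [pvPerms2_length]
    calc r * ids.length + q < r * ids.length + ids.length := by omega
    _ = (r + 1) * ids.length := by ring
    _ ≤ (ids.length - 1) * ids.length := Nat.mul_le_mul_right ids.length (by omega)
    _ = ids.length * (ids.length - 1) := by ring
  rw [List.getD_eq_getElem?_getD, List.getD_eq_getElem?_getD,
    List.getElem?_take, if_pos hq, List.getElem?_drop]

-- column-major flatMap = index map
theorem flatMap_range_eq_map {α : Type} (h : Nat → Nat → α) (a b : Nat) (hb : 0 < b) :
    (List.range a).flatMap (fun q => (List.range b).map (fun r => h r q)) =
      (List.range (a * b)).map (fun i => h (i % b) (i / b)) := by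
  induction a with
  | zero => simp
  | succ a ih =>
    rw [List.range_succ, List.flatMap_append, ih, Nat.succ_mul, List.range_add,
      List.map_append, List.map_map]
    congr 1
    · simp only [List.flatMap_cons, List.flatMap_nil, List.append_nil]
      apply List.map_congr_left
      intro t ht
      rw [List.mem_range] at ht
      simp only [Function.comp]
      have h1 : (a * b + t) % b = t := by
        rw [Nat.mul_comm a b, Nat.mul_add_mod, Nat.mod_eq_of_lt ht]
      have h2 : (a * b + t) / b = a := by
        rw [Nat.mul_comm a b, Nat.mul_add_div hb, Nat.div_eq_of_lt ht]
        omega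
      rw [h1, h2]

-- ===== VERDICT (by name: the statement is the Claim_ definition above) =====
theorem matchMaking_spec : Claim_equal_matchMaking := by
  intro ids _
  unfold Spec_matchMaking
  rcases Nat.lt_or_ge ids.length 2 with h | h
  · have h0 : ids.length = 0 ∨ ids.length = 1 := by omega
    have hL : (pvPerms2 ids).length = 0 := by
      rw [pvPerms2_length]; rcases h0 with h0 | h0 <;> simp [h0]
    simp only [matchMaking, matchMaking_alt, hL]
    rw [PySem.List.pyRange_one_eq_nil (by norm_num)]
    rcases h0 with h0 | h0 <;> simp [h0, List.range_succ]
  · rw [matchMaking_eq_map ids h, matchMaking_alt_eq ids h,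
      flatMap_range_eq_map (fun r q => (pvPerms2 ids).getD (r * ids.length + q) (0, 0))
        ids.length (ids.length - 1) (by omega)]
    apply List.map_congr_left
    intro i hi
    dsimp only
    rw [Nat.add_comm]
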